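-- pv_equiv track=rewrite | github.com/NahianPolygon/Prime_bot | Prime_bot/api.py | _infer_eligibility_outcome_from_verdicts
-- ===== SOURCE A (Python) =====
-- def _infer_eligibility_outcome_from_verdicts(verdicts: list[dict]) -> str:
--     if not verdicts:
--         return "general"
--
--     statuses = {str(item.get("status", "")).lower() for item in verdicts}
--     if statuses == {"eligible"}:
--         return "eligible"
--     if statuses == {"ineligible"}:
--         return "ineligible"
--     if "borderline" in statuses or ({"eligible", "ineligible"} & statuses and len(statuses) > 1):
--         return "borderline"
--     if "eligible" in statuses:
--         return "eligible"
--     if "ineligible" in statuses: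
--         return "ineligible"
--     return "general"
-- ===== SOURCE B (Python) =====
-- def _label(s):
--     if s == "eligible":
--         return ("e", "")
--     if s == "ineligible":
--         return ("i", "")
--     if s == "borderline":
--         return ("b", "")
--     return ("o", s)
--
--
-- def _join(x, y):
--     if x[0] == "b" or y[0] == "b":
--         return ("b", "")
--     if x == y:
--         return x
--     if x[0] in ("e", "i") or y[0] in ("e", "i"):
--         return ("b", "")
--     return ("g", "")
--
--
-- def _infer_eligibility_outcome_from_verdicts(verdicts: list[dict]) -> str:
--     # Classify each verdict into a 5-valued join-semilattice and reduce with the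
--     # associative join; the final lattice element names the outcome.
--     if not verdicts:
--         return "general"
--     labels = [_label(str(item.get("status", "")).lower()) for item in verdicts]
--     state = labels[0]
--     for cur in labels[1:]:
--         state = _join(state, cur)
--     return {"e": "eligible", "i": "ineligible", "b": "borderline"}.get(state[0], "general")
-- ===== Notes on version B (the rewrite author's own statement) =====
-- stated objective: alternative
-- what changed: Replaces A's build-a-set-of-statuses-then-test-set-equality/membership/intersection logic by a classify-then-reduce scheme: each verdict is mapped into a 5-valued join-semilattice (eligible/ineligible/borderline/other(s)/mixed-general) and the list is folded with an associative join whose final element names the outcome.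
import Mathlib
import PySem

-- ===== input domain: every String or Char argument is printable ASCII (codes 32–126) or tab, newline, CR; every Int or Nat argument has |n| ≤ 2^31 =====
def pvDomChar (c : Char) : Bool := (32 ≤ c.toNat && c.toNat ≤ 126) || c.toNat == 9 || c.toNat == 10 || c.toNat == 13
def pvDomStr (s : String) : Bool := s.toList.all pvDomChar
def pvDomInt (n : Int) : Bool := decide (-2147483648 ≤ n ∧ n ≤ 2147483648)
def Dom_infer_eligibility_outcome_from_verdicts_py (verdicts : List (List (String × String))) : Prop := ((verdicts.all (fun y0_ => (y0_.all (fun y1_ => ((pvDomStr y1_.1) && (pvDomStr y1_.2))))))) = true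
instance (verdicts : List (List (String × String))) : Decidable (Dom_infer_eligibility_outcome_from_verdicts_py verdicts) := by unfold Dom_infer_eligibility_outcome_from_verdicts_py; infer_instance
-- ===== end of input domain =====

-- B replaces A's set comprehension + set equality/intersection tests by a classify-then-reduce
-- scheme: each verdict maps into a 5-valued join-semilattice and the list is folded with an
-- associative join; the final element names the outcome (objective: alternative).

-- shared normalization: str(item.get("status", "")).lower()  (values are already str here)
def pvNormStatus (item : List (String × String)) : String :=
  PySem.Str.lower (PySem.Dict.getD (PySem.Dict.mk item) "status" "")

-- ===== PORT A =====
def infer_eligibility_outcome_from_verdicts_py (verdicts : List (List (String × String))) : String :=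
  if verdicts = [] then "general"
  else
    let statuses : PySem.Set String := PySem.Set.ofList (verdicts.map pvNormStatus)
    if PySem.Set.equal statuses ["eligible"] then "eligible"
    else if PySem.Set.equal statuses ["ineligible"] then "ineligible"
    else if PySem.Set.contains statuses "borderline" ||
        (!(PySem.Set.inter (PySem.Set.ofList ["eligible", "ineligible"]) statuses).isEmpty
          && decide (1 < PySem.Set.len statuses)) then "borderline"
    else if PySem.Set.contains statuses "eligible" then "eligible"
    else if PySem.Set.contains statuses "ineligible" then "ineligible"
    else "general"

-- ===== PORT B =====
-- the 5-valued semilattice of Source B: tuples ("e",""),("i",""),("b",""),("g",""),("o",s)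

inductive PvSt : Type
  | e | i | b | g
  | o : String → PvSt
deriving DecidableEq

def pvLabel (s : String) : PvSt :=
  if s = "eligible" then .e
  else if s = "ineligible" then .i
  else if s = "borderline" then .b
  else .o s

def pvJoin (x y : PvSt) : PvSt :=
  if x = .b ∨ y = .b then .b
  else if x = y then x
  else if (x = .e ∨ x = .i) ∨ (y = .e ∨ y = .i) then .b
  else .g


def infer_eligibility_outcome_from_verdicts_py_alt (verdicts : List (List (String × String))) : String :=
  match verdicts with
  | [] => "general"
  | v0 :: rest =>
    -- labels = [_label(norm(item)) for item in verdicts]; state = labels[0]; fold _join over labels[1:]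
    let st := (rest.map (fun item => pvLabel (pvNormStatus item))).foldl pvJoin
      (pvLabel (pvNormStatus v0))
    match st with
    | .e => "eligible"
    | .i => "ineligible"
    | .b => "borderline"
    | _ => "general"

-- ===== PRECONDITION & SPEC =====
def Spec_infer_eligibility_outcome_from_verdicts_py (verdicts : List (List (String × String))) (out : String) : Prop := out = infer_eligibility_outcome_from_verdicts_py_alt verdicts
instance (verdicts : List (List (String × String))) (out : String) : Decidable (Spec_infer_eligibility_outcome_from_verdicts_py verdicts out) := by unfold Spec_infer_eligibility_outcome_from_verdicts_py; infer_instance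

-- ===== CLAIM (what is proved, stated in full; the proofs are below) =====
def Claim_equal_infer_eligibility_outcome_from_verdicts_py : Prop := ∀ (verdicts : List (List (String × String))), Dom_infer_eligibility_outcome_from_verdicts_py verdicts → Spec_infer_eligibility_outcome_from_verdicts_py verdicts (infer_eligibility_outcome_from_verdicts_py verdicts)

-- ===== LEMMAS AND PROOFS =====

-- canonical value of B's fold over the statuses f :: R
def pvCanon (f : String) (R : List String) : PvSt :=
  if "borderline" ∈ f :: R ∨ (("eligible" ∈ f :: R ∨ "ineligible" ∈ f :: R) ∧ ∃ x ∈ R, x ≠ f)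
    then .b
  else if f = "eligible" then .e
  else if f = "ineligible" then .i
  else if ∃ x ∈ R, x ≠ f then .g
  else .o f

theorem pvCanon_nil (f : String) : pvCanon f [] = pvLabel f := by
  unfold pvCanon pvLabel
  by_cases h1 : f = "eligible" <;> by_cases h2 : f = "ineligible" <;>
    by_cases h3 : f = "borderline" <;> simp_all <;> exact fun h => h3 h.symm

theorem pv_mem_snoc (a f s : String) (R : List String) :
    (a ∈ f :: (R ++ [s])) ↔ (a ∈ f :: R ∨ a = s) := by
  simp [or_assoc]

theorem pv_ex_snoc (f s : String) (R : List String) :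
    (∃ x ∈ R ++ [s], x ≠ f) ↔ ((∃ x ∈ R, x ≠ f) ∨ s ≠ f) := by
  constructor
  · rintro ⟨x, hx, hne⟩
    rcases List.mem_append.1 hx with h | h
    · exact Or.inl ⟨x, h, hne⟩
    · simp at h; subst h; exact Or.inr hne
  · rintro (⟨x, hx, hne⟩ | hne)
    · exact ⟨x, List.mem_append_left _ hx, hne⟩
    · exact ⟨s, List.mem_append_right _ (by simp), hne⟩

set_option maxHeartbeats 1000000 in
theorem pvCanon_snoc (f : String) (R : List String) (s : String) :
    pvCanon f (R ++ [s]) = pvJoin (pvCanon f R) (pvLabel s) := by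
  unfold pvCanon
  simp only [pv_mem_snoc, pv_ex_snoc]
  by_cases hM : ∃ x ∈ R, x ≠ f
  · by_cases hB : "borderline" ∈ f :: R
    · simp only [if_pos (Or.inl hB), if_pos (Or.inl (Or.inl hB)), pvJoin]
      simp
    · by_cases hEI : ("eligible" ∈ f :: R) ∨ ("ineligible" ∈ f :: R)
      · have c1 : ("borderline" ∈ f :: R ∨ (("eligible" ∈ f :: R ∨ "ineligible" ∈ f :: R) ∧ ∃ x ∈ R, x ≠ f)) := Or.inr ⟨hEI, hM⟩
        have c1' : (("borderline" ∈ f :: R ∨ "borderline" = s) ∨ ((("eligible" ∈ f :: R ∨ "eligible" = s) ∨ ("ineligible" ∈ f :: R ∨ "ineligible" = s)) ∧ ((∃ x ∈ R, x ≠ f) ∨ s ≠ f))) := by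
          rcases hEI with h | h
          · exact Or.inr ⟨Or.inl (Or.inl h), Or.inl hM⟩
          · exact Or.inr ⟨Or.inr (Or.inl h), Or.inl hM⟩
        rw [if_pos c1, if_pos c1']
        simp [pvJoin]
      · have h1 : ¬ f = "eligible" := fun h => hEI (Or.inl (by simp [h]))
        have h2 : ¬ f = "ineligible" := fun h => hEI (Or.inr (by simp [h]))
        have c1 : ¬ ("borderline" ∈ f :: R ∨ (("eligible" ∈ f :: R ∨ "ineligible" ∈ f :: R) ∧ ∃ x ∈ R, x ≠ f)) := by
          rintro (h | ⟨h, _⟩) <;> [exact hB h; exact hEI h]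
        rw [if_neg c1, if_neg h1, if_neg h2, if_pos hM]
        -- RHS state is .g; now case on s
        by_cases hs3 : s = "borderline"
        · rw [if_pos (Or.inl (Or.inr hs3.symm))]
          simp [pvJoin, pvLabel, hs3]
        · by_cases hs1 : s = "eligible"
          · rw [if_pos (Or.inr ⟨Or.inl (Or.inr hs1.symm), Or.inl hM⟩)]
            simp [pvJoin, pvLabel, hs1, h1, h2]
          · by_cases hs2 : s = "ineligible"
            · rw [if_pos (Or.inr ⟨Or.inr (Or.inr hs2.symm), Or.inl hM⟩)]
              simp [pvJoin, pvLabel, hs2, h1, h2]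
            · have c1' : ¬ (("borderline" ∈ f :: R ∨ "borderline" = s) ∨ ((("eligible" ∈ f :: R ∨ "eligible" = s) ∨ ("ineligible" ∈ f :: R ∨ "ineligible" = s)) ∧ ((∃ x ∈ R, x ≠ f) ∨ s ≠ f))) := by
                rintro ((h | h) | ⟨(h | h) | (h | h), _⟩)
                · exact hB h
                · exact hs3 h.symm
                · exact hEI (Or.inl h)
                · exact hs1 h.symm
                · exact hEI (Or.inr h)
                · exact hs2 h.symm
              rw [if_neg c1', if_neg h1, if_neg h2, if_pos (Or.inl hM)]
              simp [pvJoin, pvLabel, hs1, hs2, hs3]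
  · -- R is homogeneous: every element equals f
    push_neg at hM
    have hno : ¬ ∃ x ∈ R, ¬ x = f := by push_neg; exact hM
    have hex1 : (∃ x ∈ R, ¬ x = f) ↔ False := iff_false_intro hno
    have hmem : ∀ a, (a ∈ f :: R) ↔ a = f := by
      intro a
      simp only [List.mem_cons]
      exact ⟨fun h => h.elim id (hM a), Or.inl⟩
    simp only [hmem, ne_eq, hex1, false_or, or_false, and_false, false_and, if_false]
    clear hM hno hex1 hmem
    by_cases hsf : s = f
    · subst hsf
      by_cases h3 : s = "borderline" <;> by_cases h1 : s = "eligible" <;>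
        by_cases h2 : s = "ineligible" <;>
        simp_all [pvJoin, pvLabel, eq_comm]
    · by_cases h3 : f = "borderline" <;> by_cases hs3 : s = "borderline" <;>
      by_cases h1 : f = "eligible" <;> by_cases hs1 : s = "eligible" <;>
      by_cases h2 : f = "ineligible" <;> by_cases hs2 : s = "ineligible" <;>
        simp_all [pvJoin, pvLabel, eq_comm]

theorem pvFold_eq_canon (f : String) (R : List String) :
    R.foldl (fun st s => pvJoin st (pvLabel s)) (pvLabel f) = pvCanon f R := by
  induction R using List.reverseRecOn with
  | nil => exact (pvCanon_nil f).symm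
  | append_singleton R s ih =>
    rw [List.foldl_append, List.foldl_cons, List.foldl_nil, ih, pvCanon_snoc]

theorem pv_equal_singleton (f y : String) (R : List String) :
    PySem.Set.equal (PySem.Set.ofList (f :: R)) [y] = decide (f = y ∧ ∀ x ∈ R, x = f) := by
  rw [Bool.eq_iff_iff, PySem.Set.equal_iff, decide_eq_true_eq]
  constructor
  · intro h
    have hf : f = y := by
      have := (h f).1 (by simp [PySem.Set.mem_ofList])
      simpa using this
    refine ⟨hf, fun x hx => ?_⟩
    have := (h x).1 (by simp [PySem.Set.mem_ofList, hx])
    simp at this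
    exact this.trans hf.symm
  · rintro ⟨hf, hall⟩ x
    simp only [PySem.Set.mem_ofList, List.mem_cons, List.not_mem_nil, or_false]
    constructor
    · rintro (rfl | hx)
      · exact hf
      · exact (hall x hx).trans hf
    · rintro rfl
      exact Or.inl hf.symm

theorem pv_contains (L : List String) (y : String) :
    PySem.Set.contains (PySem.Set.ofList L) y = decide (y ∈ L) := by
  rw [Bool.eq_iff_iff, PySem.Set.contains_iff, PySem.Set.mem_ofList, decide_eq_true_eq]

theorem pv_inter_empty (L : List String) :
    (PySem.Set.inter (PySem.Set.ofList ["eligible", "ineligible"]) (PySem.Set.ofList L)).isEmpty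
      = decide (¬("eligible" ∈ L ∨ "ineligible" ∈ L)) := by
  rw [Bool.eq_iff_iff, List.isEmpty_iff, List.eq_nil_iff_forall_not_mem, decide_eq_true_eq]
  constructor
  · intro h hor
    rcases hor with he | hi
    · exact h "eligible" ((PySem.Set.mem_inter _ _ _).2
        ⟨by simp [PySem.Set.mem_ofList], (PySem.Set.mem_ofList _ _).2 he⟩)
    · exact h "ineligible" ((PySem.Set.mem_inter _ _ _).2
        ⟨by simp [PySem.Set.mem_ofList], (PySem.Set.mem_ofList _ _).2 hi⟩)
  · intro h y hy
    rcases (PySem.Set.mem_inter _ _ _).1 hy with ⟨h2, hL⟩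
    have h2' : y = "eligible" ∨ y = "ineligible" := by
      simpa [PySem.Set.mem_ofList] using h2
    have hL' := (PySem.Set.mem_ofList _ _).1 hL
    rcases h2' with rfl | rfl
    · exact h (Or.inl hL')
    · exact h (Or.inr hL')

theorem pv_len_gt (f : String) (R : List String) :
    decide (1 < PySem.Set.len (PySem.Set.ofList (f :: R))) = decide (∃ x ∈ R, x ≠ f) := by
  rw [decide_eq_decide, PySem.Set.ofList_cons]
  simp only [PySem.Set.len, List.length_cons]
  constructor
  · intro h
    have hpos : 0 < (PySem.Set.discard (PySem.Set.ofList R) f).length := by omega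
    obtain ⟨y, hy⟩ := List.exists_mem_of_length_pos hpos
    rcases (PySem.Set.mem_discard _ _ _).1 hy with ⟨hyR, hyne⟩
    exact ⟨y, (PySem.Set.mem_ofList _ _).1 hyR, hyne⟩
  · rintro ⟨x, hx, hne⟩
    have hmem : x ∈ PySem.Set.discard (PySem.Set.ofList R) f :=
      (PySem.Set.mem_discard _ _ _).2 ⟨(PySem.Set.mem_ofList _ _).2 hx, hne⟩
    have := List.length_pos_of_mem hmem
    omega

-- A's decision chain equals the readout of pvCanon
set_option maxHeartbeats 1000000 in
theorem pv_bridge (f : String) (R : List String) :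
    (if decide (f = "eligible" ∧ ∀ x ∈ R, x = f) = true then "eligible"
     else if decide (f = "ineligible" ∧ ∀ x ∈ R, x = f) = true then "ineligible"
     else if (decide ("borderline" ∈ f :: R) ||
         !decide (¬("eligible" ∈ f :: R ∨ "ineligible" ∈ f :: R)) &&
           decide (1 < PySem.Set.len (PySem.Set.ofList (f :: R)))) = true then "borderline"
     else if decide ("eligible" ∈ f :: R) = true then "eligible"
     else if decide ("ineligible" ∈ f :: R) = true then "ineligible"
     else "general")
    =
    (match pvCanon f R with
     | .e => "eligible"
     | .i => "ineligible"
     | .b => "borderline"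
     | _ => "general") := by
  rw [pv_len_gt]
  unfold pvCanon
  simp only [Bool.or_eq_true, Bool.and_eq_true, Bool.not_eq_true', decide_eq_true_eq,
    decide_eq_false_iff_not, not_not, ne_eq]
  by_cases hM : ∃ x ∈ R, ¬ x = f
  · have hnall : ¬ (∀ x ∈ R, x = f) := fun h => by
      obtain ⟨x, hx, hne⟩ := hM; exact hne (h x hx)
    rw [if_neg (fun h => hnall h.2), if_neg (fun h => hnall h.2)]
    by_cases hB : "borderline" ∈ f :: R
    · rw [if_pos (Or.inl hB), if_pos (Or.inl hB)]
    · by_cases hEI : "eligible" ∈ f :: R ∨ "ineligible" ∈ f :: R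
      · rw [if_pos (Or.inr ⟨hEI, hM⟩), if_pos (Or.inr ⟨hEI, hM⟩)]
      · have h1 : ¬ f = "eligible" := fun h => hEI (Or.inl (by simp [h]))
        have h2 : ¬ f = "ineligible" := fun h => hEI (Or.inr (by simp [h]))
        have hE : "eligible" ∉ f :: R := fun h => hEI (Or.inl h)
        have hI : "ineligible" ∉ f :: R := fun h => hEI (Or.inr h)
        simp [hB, hE, hI, h1, h2, hM]
  · push_neg at hM
    have hall : (∀ x ∈ R, x = f) ↔ True := iff_true_intro hM
    have hex1 : (∃ x ∈ R, ¬ x = f) ↔ False :=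
      iff_false_intro (by push_neg; exact hM)
    have hmem : ∀ a, (a ∈ f :: R) ↔ a = f := by
      intro a
      simp only [List.mem_cons]
      exact ⟨fun h => h.elim id (hM a), Or.inl⟩
    simp only [hmem, hall, hex1, and_true, and_false, or_false, false_or, if_false]
    by_cases h1 : f = "eligible" <;> by_cases h2 : f = "ineligible" <;>
      by_cases h3 : f = "borderline" <;> simp_all [eq_comm]

-- ===== VERDICT (by name: the statement is the Claim_ definition above) =====
set_option maxHeartbeats 1000000 in
theorem infer_eligibility_outcome_from_verdicts_py_spec : Claim_equal_infer_eligibility_outcome_from_verdicts_py := by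
  intro verdicts _
  unfold Spec_infer_eligibility_outcome_from_verdicts_py
  cases verdicts with
  | nil => rfl
  | cons v0 rest =>
    have hf : (rest.map (fun item => pvLabel (pvNormStatus item))).foldl pvJoin
        (pvLabel (pvNormStatus v0))
        = pvCanon (pvNormStatus v0) (rest.map pvNormStatus) := by
      rw [List.foldl_map, ← pvFold_eq_canon, List.foldl_map]
    unfold infer_eligibility_outcome_from_verdicts_py infer_eligibility_outcome_from_verdicts_py_alt
    rw [if_neg (by simp)]
    simp only [List.map_cons, pv_equal_singleton, pv_contains, pv_inter_empty, hf]
    exact pv_bridge (pvNormStatus v0) (List.map pvNormStatus rest)
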